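-- pv_equiv track=rewrite | github.com/AshleyLeeB/SimECNY | transaction/unified_transaction_generator4.py | _validate_many_to_one_completeness
-- ===== SOURCE A (Python) =====
-- from typing import Dict, List, Tuple
--
-- def _validate_many_to_one_completeness(transactions: List[Dict], main_wallet: str) -> bool:
--     """验证many_to_one交易的完整性（只验证结构）"""
--     if len(transactions) < 3:
--         return False
--
--     # 按主钱包分组（出现次数最多的dst）
--     dst_counts = {}
--     for tx in transactions:
--         dst = tx.get("dst")
--         dst_counts[dst] = dst_counts.get(dst, 0) + 1
--
--     # 找出主钱包（出现次数最多的dst）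
--     main_wallet_by_dst = max(dst_counts, key=dst_counts.get)
--
--     # 检查转入和转出交易
--     incoming_txs = [tx for tx in transactions if tx.get("dst") == main_wallet_by_dst]
--     outgoing_txs = [tx for tx in transactions if tx.get("src") == main_wallet_by_dst]
--
--     # 必须至少有2笔转入和1笔转出
--     if len(incoming_txs) < 2 or len(outgoing_txs) < 1:
--         return False
--
--     return True
-- ===== SOURCE B (Python) =====
-- def _validate_many_to_one_completeness(transactions, main_wallet):
--     if len(transactions) < 3:
--         return False
--     # Single explicit scan with a running strict-max leader: at each first
--     # occurrence of a dst value, tally it with a nested scan; no dict, no max().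
--     best_v, best_c = None, 0
--     seen = []
--     for tx in transactions:
--         v = tx.get("dst")
--         if v not in seen:
--             seen.append(v)
--             c = sum(1 for t in transactions if t.get("dst") == v)
--             if best_c < c:
--                 best_v, best_c = v, c
--     return best_c >= 2 and any(tx.get("src") == best_v for tx in transactions)
-- ===== Notes on version B (the rewrite author's own statement) =====
-- stated objective: alternative
-- what changed: B replaces A's counting dict, the max(..., key=dict.get) call and the two filter comprehensions by one explicit scan that, at each first occurrence of a dst value, tallies it with a nested scan and keeps a running strict-max leader (value, count), then decides with the cached count and a short-circuit any() over the srcs.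
import Mathlib
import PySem

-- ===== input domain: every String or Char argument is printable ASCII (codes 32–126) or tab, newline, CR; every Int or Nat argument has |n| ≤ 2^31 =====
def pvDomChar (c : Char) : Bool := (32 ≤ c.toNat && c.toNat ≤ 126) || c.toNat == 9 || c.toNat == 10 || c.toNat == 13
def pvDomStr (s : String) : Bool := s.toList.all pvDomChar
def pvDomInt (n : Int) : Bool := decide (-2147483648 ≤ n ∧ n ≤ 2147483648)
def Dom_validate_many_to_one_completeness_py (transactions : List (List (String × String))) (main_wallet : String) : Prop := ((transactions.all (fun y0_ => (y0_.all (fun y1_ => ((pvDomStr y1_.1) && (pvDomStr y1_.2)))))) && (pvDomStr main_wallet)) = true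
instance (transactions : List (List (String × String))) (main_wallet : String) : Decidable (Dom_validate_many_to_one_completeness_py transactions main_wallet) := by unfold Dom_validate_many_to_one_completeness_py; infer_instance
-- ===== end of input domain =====

-- B replaces A's counting dict + max() + two filter passes by a single explicit scan that
-- keeps a running strict-max leader over first occurrences (tallying each by a nested scan)
-- and a short-circuit any() over the srcs (objective: alternative).

-- tx.get(k) for the dict tx (assoc list, first match)
def pvTxGet (tx : List (String × String)) (k : String) : Option String :=
  (PySem.Dict.mk tx).get? k

-- ===== PORT A =====
def validate_many_to_one_completeness_py (transactions : List (List (String × String))) (main_wallet : String) : Bool :=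
  if transactions.length < 3 then false
  else
    -- dst_counts[dst] = dst_counts.get(dst, 0) + 1
    let dst_counts : PySem.Dict (Option String) Int :=
      transactions.foldl (fun d tx => d.insert (pvTxGet tx "dst") (d.getD (pvTxGet tx "dst") 0 + 1)) PySem.Dict.empty
    -- max(dst_counts, key=dst_counts.get): first key (insertion order) with maximal count
    match PySem.List.max? dst_counts.keys (fun k => dst_counts.getD k 0) with
    | none => false  -- unreachable: len(transactions) >= 3, so the dict is nonempty
    | some main_wallet_by_dst =>
      let incoming_txs := transactions.filter (fun tx => pvTxGet tx "dst" == main_wallet_by_dst)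
      let outgoing_txs := transactions.filter (fun tx => pvTxGet tx "src" == main_wallet_by_dst)
      if incoming_txs.length < 2 ∨ outgoing_txs.length < 1 then false else true

-- ===== PORT B =====
def validate_many_to_one_completeness_py_alt (transactions : List (List (String × String))) (main_wallet : String) : Bool :=
  if transactions.length < 3 then false
  else
    -- state (best_v, best_c, seen); Python's initial best_v = None is a value of the dst type
    let st := transactions.foldl (fun (st : Option String × Int × List (Option String)) tx =>
      let v := pvTxGet tx "dst"
      if st.2.2.contains v then st
      else
        let c : Int := (transactions.countP (fun t => pvTxGet t "dst" == v) : Int)  -- sum(1 for t … if …)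
        if st.2.1 < c then (v, c, st.2.2 ++ [v]) else (st.1, st.2.1, st.2.2 ++ [v])
      ) (none, 0, [])
    decide (2 ≤ st.2.1) && transactions.any (fun tx => pvTxGet tx "src" == st.1)

-- ===== PRECONDITION & SPEC =====
def Spec_validate_many_to_one_completeness_py (transactions : List (List (String × String))) (main_wallet : String) (out : Bool) : Prop := out = validate_many_to_one_completeness_py_alt transactions main_wallet
instance (transactions : List (List (String × String))) (main_wallet : String) (out : Bool) : Decidable (Spec_validate_many_to_one_completeness_py transactions main_wallet out) := by unfold Spec_validate_many_to_one_completeness_py; infer_instance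

-- ===== CLAIM (what is proved, stated in full; the proofs are below) =====
def Claim_equal_validate_many_to_one_completeness_py : Prop := ∀ (transactions : List (List (String × String))) (main_wallet : String), Dom_validate_many_to_one_completeness_py transactions main_wallet → Spec_validate_many_to_one_completeness_py transactions main_wallet (validate_many_to_one_completeness_py transactions main_wallet)

-- ===== LEMMAS AND PROOFS =====

-- A's counting loop over transactions is Counter(dsts)
theorem pv_fold_eq_counter (transactions : List (List (String × String))) :
    transactions.foldl (fun d tx => d.insert (pvTxGet tx "dst") (d.getD (pvTxGet tx "dst") 0 + 1)) PySem.Dict.empty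
      = PySem.Dict.counter (transactions.map (fun tx => pvTxGet tx "dst")) := by
  rw [← PySem.Dict.foldl_insert_getD_add_one_eq_counter, List.foldl_map]

-- count of the filtered list = count in the mapped list
theorem pv_filter_len_eq_count (transactions : List (List (String × String))) (key : String) (m : Option String) :
    (transactions.filter (fun tx => pvTxGet tx key == m)).length
      = (transactions.map (fun tx => pvTxGet tx key)).count m := by
  rw [List.count, List.countP_map, List.countP_eq_length_filter]
  rfl

-- B's nested tally over the whole list = count of v among the dsts
theorem pv_countP_eq_count (all : List (List (String × String))) (v : Option String) :
    all.countP (fun t => pvTxGet t "dst" == v) = (all.map (fun t => pvTxGet t "dst")).count v := by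
  rw [List.count, List.countP_map]
  rfl

-- invariant of B's single scan: (best_v, best_c) is the first-maximal-by-count element of seen, with its count cached
def pvInv (dsts : List (Option String)) (st : Option String × Int × List (Option String)) : Prop :=
  match PySem.List.max? st.2.2 (fun k => (dsts.count k : Int)) with
  | none => st.1 = none ∧ st.2.1 = 0
  | some m => st.1 = m ∧ st.2.1 = (dsts.count m : Int)

theorem pv_foldB (all : List (List (String × String))) :
    ∀ (txs : List (List (String × String))), (∀ tx ∈ txs, tx ∈ all) →
    ∀ st : Option String × Int × List (Option String),
    pvInv (all.map (fun t => pvTxGet t "dst")) st →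
    pvInv (all.map (fun t => pvTxGet t "dst"))
        (txs.foldl (fun (st : Option String × Int × List (Option String)) tx =>
          let v := pvTxGet tx "dst"
          if st.2.2.contains v then st
          else
            let c : Int := (all.countP (fun t => pvTxGet t "dst" == v) : Int)
            if st.2.1 < c then (v, c, st.2.2 ++ [v]) else (st.1, st.2.1, st.2.2 ++ [v])) st)
      ∧ (txs.foldl (fun (st : Option String × Int × List (Option String)) tx =>
          let v := pvTxGet tx "dst"
          if st.2.2.contains v then st
          else
            let c : Int := (all.countP (fun t => pvTxGet t "dst" == v) : Int)
            if st.2.1 < c then (v, c, st.2.2 ++ [v]) else (st.1, st.2.1, st.2.2 ++ [v])) st).2.2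
        = txs.foldl (fun s tx => PySem.Set.add s (pvTxGet tx "dst")) st.2.2 := by
  intro txs
  induction txs with
  | nil => intro _ st h; exact ⟨h, rfl⟩
  | cons tx t ih =>
    intro hmem st h
    have htx : tx ∈ all := hmem tx (by simp)
    have hcnt : 1 ≤ ((all.map (fun t => pvTxGet t "dst")).count (pvTxGet tx "dst") : Int) := by
      have : 0 < (all.map (fun t => pvTxGet t "dst")).count (pvTxGet tx "dst") :=
        List.count_pos_iff.mpr (List.mem_map.mpr ⟨tx, htx, rfl⟩)
      omega
    simp only [List.foldl_cons]
    set dsts := all.map (fun t => pvTxGet t "dst") with hd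
    by_cases hv : st.2.2.contains (pvTxGet tx "dst")
    · -- duplicate dst: the scan skips it and Set.add is the identity
      have hadd : PySem.Set.add st.2.2 (pvTxGet tx "dst") = st.2.2 := by
        simp only [PySem.Set.add, PySem.Set.contains, hv, if_pos]
      rw [if_pos hv, hadd]
      exact ih (fun x hx => hmem x (by simp [hx])) st h
    · -- first occurrence of this dst
      have hadd : PySem.Set.add st.2.2 (pvTxGet tx "dst") = st.2.2 ++ [pvTxGet tx "dst"] := by
        have hv' : pvTxGet tx "dst" ∉ st.2.2 := by simpa using hv
        simp [PySem.Set.add, PySem.Set.contains, hv']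
      have hc : ((all.countP (fun t => pvTxGet t "dst" == pvTxGet tx "dst") : Nat) : Int)
          = (dsts.count (pvTxGet tx "dst") : Int) := by
        rw [pv_countP_eq_count]
      unfold pvInv at h
      cases hm : PySem.List.max? st.2.2 (fun k => (dsts.count k : Int)) with
      | none =>
        rw [hm] at h
        obtain ⟨hb, hz⟩ := h
        have hseen : st.2.2 = [] := (PySem.List.max?_eq_none_iff _ _).mp hm
        have hupd : st.2.1 < ((all.countP (fun t => pvTxGet t "dst" == pvTxGet tx "dst") : Nat) : Int) := by
          rw [hc, hz]; omega
        rw [if_neg hv, if_pos hupd, hadd]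
        refine ih (fun x hx => hmem x (by simp [hx])) _ ?_
        unfold pvInv
        rw [hseen]
        simp only [List.nil_append]
        have : PySem.List.max? [pvTxGet tx "dst"] (fun k => (dsts.count k : Int))
            = some (pvTxGet tx "dst") := rfl
        rw [this]
        exact ⟨rfl, hc⟩
      | some m =>
        rw [hm] at h
        obtain ⟨hb, hcm⟩ := h
        have hmax : PySem.List.max? (st.2.2 ++ [pvTxGet tx "dst"]) (fun k => (dsts.count k : Int))
            = if ((dsts.count m : Int) < (dsts.count (pvTxGet tx "dst") : Int))
              then some (pvTxGet tx "dst") else some m := by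
          unfold PySem.List.max? at hm ⊢
          rw [List.foldl_append, hm]
          simp only [List.foldl_cons, List.foldl_nil]
        by_cases hlt : (dsts.count m : Int) < (dsts.count (pvTxGet tx "dst") : Int)
        · have hupd : st.2.1 < ((all.countP (fun t => pvTxGet t "dst" == pvTxGet tx "dst") : Nat) : Int) := by
            rw [hc, hcm]; exact hlt
          rw [if_neg hv, if_pos hupd, hadd]
          refine ih (fun x hx => hmem x (by simp [hx])) _ ?_
          unfold pvInv
          rw [hmax, if_pos hlt]
          exact ⟨rfl, hc⟩
        · have hupd : ¬ st.2.1 < ((all.countP (fun t => pvTxGet t "dst" == pvTxGet tx "dst") : Nat) : Int) := by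
            rw [hc, hcm]; exact hlt
          rw [if_neg hv, if_neg hupd, hadd]
          refine ih (fun x hx => hmem x (by simp [hx])) _ ?_
          unfold pvInv
          rw [hmax, if_neg hlt]
          exact ⟨hb, hcm⟩

-- ===== VERDICT (by name: the statement is the Claim_ definition above) =====
theorem validate_many_to_one_completeness_py_spec : Claim_equal_validate_many_to_one_completeness_py := by
  intro transactions main_wallet _
  unfold Spec_validate_many_to_one_completeness_py
  unfold validate_many_to_one_completeness_py validate_many_to_one_completeness_py_alt
  by_cases hlen : transactions.length < 3
  · simp [hlen]
  · simp only [hlen, if_false]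
    rw [pv_fold_eq_counter]
    set dsts := transactions.map (fun tx => pvTxGet tx "dst") with hdsts
    have hkeys : (PySem.Dict.counter dsts).keys = PySem.Set.ofList dsts := PySem.Dict.keys_counter dsts
    have hkey : (fun k => (PySem.Dict.counter dsts).getD k 0) = (fun k => (dsts.count k : Int)) :=
      funext fun k => PySem.Dict.getD_counter dsts k
    rw [hkeys, hkey]
    -- characterise B's scan
    have hfold := pv_foldB transactions transactions (fun _ h => h) (none, 0, []) (by
      unfold pvInv
      simp [PySem.List.max?])
    obtain ⟨hinv, hseen⟩ := hfold
    have hseen' : (transactions.foldl (fun (st : Option String × Int × List (Option String)) tx =>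
          let v := pvTxGet tx "dst"
          if st.2.2.contains v then st
          else
            let c : Int := (transactions.countP (fun t => pvTxGet t "dst" == v) : Int)
            if st.2.1 < c then (v, c, st.2.2 ++ [v]) else (st.1, st.2.1, st.2.2 ++ [v])) (none, 0, [])).2.2
        = PySem.Set.ofList dsts := by
      rw [hseen, hdsts, PySem.Set.ofList, List.foldl_map]
      rfl
    unfold pvInv at hinv
    rw [hseen'] at hinv
    -- the dst list is nonempty, so max? returns some main
    have hne : dsts ≠ [] := by
      rw [hdsts]
      simp only [ne_eq, List.map_eq_nil_iff]
      intro h; rw [h] at hlen; simp at hlen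
    cases hmax : PySem.List.max? (PySem.Set.ofList dsts) (fun k => (dsts.count k : Int)) with
    | none =>
      exfalso
      have := (PySem.List.max?_eq_none_iff _ _).mp hmax
      obtain ⟨x, hx⟩ := List.exists_mem_of_ne_nil dsts hne
      have : x ∈ PySem.Set.ofList dsts := by
        rw [← PySem.List.dedup_eq_ofList]
        exact (PySem.List.mem_dedup _ _).mpr hx
      simp_all
    | some m =>
      rw [hmax] at hinv
      obtain ⟨hbv, hbc⟩ := hinv
      dsimp only
      rw [hbv, hbc]
      rw [pv_filter_len_eq_count transactions "dst" m, ← hdsts]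
      have hany : (0 < (transactions.filter (fun tx => pvTxGet tx "src" == m)).length)
          ↔ transactions.any (fun tx => pvTxGet tx "src" == m) = true := by
        simp [List.length_pos_iff, List.any_eq_true, List.filter_eq_nil_iff]
      by_cases h2 : dsts.count m < 2
      · have : ¬ (2 : Int) ≤ (dsts.count m : Int) := by exact_mod_cast by omega
        simp [h2, this]
      · by_cases h1 : (transactions.filter (fun tx => pvTxGet tx "src" == m)).length < 1
        · have hno : ¬ transactions.any (fun tx => pvTxGet tx "src" == m) = true := by
            rw [← hany]; omega
          simp [h2, h1, hno]
        · have hyes : transactions.any (fun tx => pvTxGet tx "src" == m) = true := by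
            rw [← hany]; omega
          have : (2 : Int) ≤ (dsts.count m : Int) := by exact_mod_cast by omega
          simp [h2, h1, hyes, this]
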